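-- pv_equiv track=rewrite | github.com/xenn0010/KTT | kitt/services/weather_service.py | _calculate_weather_severity
-- ===== SOURCE A (Python) =====
-- from typing import Dict, Optional, Tuple
--
-- def _calculate_weather_severity(origin: Dict, dest: Dict) -> int:
--     """
--     Calculate weather severity (1-5)
--
--     1 = Clear
--     2 = Cloudy
--     3 = Rain/Snow
--     4 = Heavy Rain/Snow
--     5 = Severe Weather
--     """
--     conditions = [origin.get("condition", "clear"), dest.get("condition", "clear")]
--
--     if any(c in ["thunderstorm", "tornado", "hurricane"] for c in conditions):
--         return 5
--     elif any(c in ["snow", "heavy rain"] for c in conditions):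
--         return 4
--     elif any(c in ["rain", "drizzle"] for c in conditions):
--         return 3
--     elif any(c in ["clouds", "mist", "fog"] for c in conditions):
--         return 2
--     else:
--         return 1
-- ===== SOURCE B (Python) =====
-- _SEVERITY = {
--     "thunderstorm": 5, "tornado": 5, "hurricane": 5,
--     "snow": 4, "heavy rain": 4,
--     "rain": 3, "drizzle": 3,
--     "clouds": 2, "mist": 2, "fog": 2,
-- }
--
-- def _calculate_weather_severity(origin, dest):
--     return max(_SEVERITY.get(origin.get("condition", "clear"), 1),
--                _SEVERITY.get(dest.get("condition", "clear"), 1))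
-- ===== Notes on version B (the rewrite author's own statement) =====
-- stated objective: idiomatic
-- what changed: Replaced the ordered if/elif cascade of any(...) membership tests over a two-element list with a single severity lookup table and a max over the two conditions' individual severities.
import Mathlib
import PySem

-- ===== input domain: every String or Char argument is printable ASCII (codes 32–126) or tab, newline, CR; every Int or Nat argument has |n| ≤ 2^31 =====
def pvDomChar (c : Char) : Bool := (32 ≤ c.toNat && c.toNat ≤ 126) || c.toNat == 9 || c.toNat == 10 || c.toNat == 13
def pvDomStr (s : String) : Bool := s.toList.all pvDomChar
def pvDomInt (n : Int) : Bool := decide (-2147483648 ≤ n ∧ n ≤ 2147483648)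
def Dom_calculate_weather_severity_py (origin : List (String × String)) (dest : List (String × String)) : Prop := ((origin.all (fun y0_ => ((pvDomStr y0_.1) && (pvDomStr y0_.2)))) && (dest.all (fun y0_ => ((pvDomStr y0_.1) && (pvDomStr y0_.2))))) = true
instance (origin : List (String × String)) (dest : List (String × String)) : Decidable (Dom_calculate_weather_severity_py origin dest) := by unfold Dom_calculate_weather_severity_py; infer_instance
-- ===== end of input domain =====

-- B replaces A's if/elif cascade of any(...) membership tests by a severity lookup table and
-- a max over the two conditions' individual severities (idiomatic; same cost).

-- ===== PORT A =====
def calculate_weather_severity_py (origin : List (String × String)) (dest : List (String × String)) : Int :=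
  let conditions : List String :=
    [(PySem.Dict.mk origin).getD "condition" "clear", (PySem.Dict.mk dest).getD "condition" "clear"]
  if conditions.any (fun c => (["thunderstorm", "tornado", "hurricane"] : List String).contains c) then 5
  else if conditions.any (fun c => (["snow", "heavy rain"] : List String).contains c) then 4
  else if conditions.any (fun c => (["rain", "drizzle"] : List String).contains c) then 3
  else if conditions.any (fun c => (["clouds", "mist", "fog"] : List String).contains c) then 2
  else 1

-- ===== PORT B =====
def pvSeverityTable : PySem.Dict String Int :=
  PySem.Dict.mk
    [("thunderstorm", 5), ("tornado", 5), ("hurricane", 5),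
     ("snow", 4), ("heavy rain", 4),
     ("rain", 3), ("drizzle", 3),
     ("clouds", 2), ("mist", 2), ("fog", 2)]

def calculate_weather_severity_py_alt (origin : List (String × String)) (dest : List (String × String)) : Int :=
  max (pvSeverityTable.getD ((PySem.Dict.mk origin).getD "condition" "clear") 1)
      (pvSeverityTable.getD ((PySem.Dict.mk dest).getD "condition" "clear") 1)

-- ===== PRECONDITION & SPEC =====
def Spec_calculate_weather_severity_py (origin : List (String × String)) (dest : List (String × String)) (out : Int) : Prop := out = calculate_weather_severity_py_alt origin dest
instance (origin : List (String × String)) (dest : List (String × String)) (out : Int) : Decidable (Spec_calculate_weather_severity_py origin dest out) := by unfold Spec_calculate_weather_severity_py; infer_instance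

-- ===== CLAIM (what is proved, stated in full; the proofs are below) =====
def Claim_equal_calculate_weather_severity_py : Prop := ∀ (origin : List (String × String)) (dest : List (String × String)), Dom_calculate_weather_severity_py origin dest → Spec_calculate_weather_severity_py origin dest (calculate_weather_severity_py origin dest)

-- ===== LEMMAS AND PROOFS =====

-- the table lookup as a chain of string comparisons
theorem pvSeverity_getD (c : String) :
    pvSeverityTable.getD c 1 =
      if "thunderstorm" = c ∨ "tornado" = c ∨ "hurricane" = c then 5
      else if "snow" = c ∨ "heavy rain" = c then 4
      else if "rain" = c ∨ "drizzle" = c then 3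
      else if "clouds" = c ∨ "mist" = c ∨ "fog" = c then 2
      else 1 := by
  simp only [pvSeverityTable, PySem.Dict.getD, PySem.Dict.get?_mk_cons]
  split_ifs <;> simp_all [PySem.Dict.get?]

-- the cascade over two conditions is the max of their individual severities
theorem pv_cascade_eq_max (c1 c2 : String) :
    (if ([c1, c2].any (fun c => (["thunderstorm", "tornado", "hurricane"] : List String).contains c)) then (5 : Int)
     else if ([c1, c2].any (fun c => (["snow", "heavy rain"] : List String).contains c)) then 4
     else if ([c1, c2].any (fun c => (["rain", "drizzle"] : List String).contains c)) then 3
     else if ([c1, c2].any (fun c => (["clouds", "mist", "fog"] : List String).contains c)) then 2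
     else 1)
    = max (pvSeverityTable.getD c1 1) (pvSeverityTable.getD c2 1) := by
  rw [pvSeverity_getD c1, pvSeverity_getD c2]
  simp only [List.any_cons, List.any_nil, List.contains_cons, List.contains_nil,
    Bool.or_false, Bool.or_eq_true, beq_iff_eq]
  split_ifs <;> simp_all [@eq_comm String]

-- ===== VERDICT (by name: the statement is the Claim_ definition above) =====
theorem calculate_weather_severity_py_spec : Claim_equal_calculate_weather_severity_py := by
  intro origin dest _
  unfold Spec_calculate_weather_severity_py calculate_weather_severity_py calculate_weather_severity_py_alt
  exact pv_cascade_eq_max _ _
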